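-- pv_equiv track=rewrite | github.com/luxevistainfo-dev/AstraNet-Core | ai/smart_contract_checker.py | detect_potential_infinite_loop
-- ===== SOURCE A (Python) =====
-- def detect_potential_infinite_loop(code):
--     """Simple infinite loop detection"""
--     lines = code.split('\n')
--     for i, line in enumerate(lines):
--         if 'while True:' in line or 'while 1:' in line:
--             # Check if there's a break in the loop
--             loop_body = '\n'.join(lines[i+1:i+20])
--             if 'break' not in loop_body and 'return' not in loop_body:
--                 return True
--     return False
-- ===== SOURCE B (Python) =====
-- def detect_potential_infinite_loop(code):
--     """Single backward pass: track distance to the nearest break/return line below."""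
--     found = False
--     dist = None  # distance from current line to nearest 'break'/'return' line at or below it
--     for line in reversed(code.split('\n')):
--         below = dist
--         if 'break' in line or 'return' in line:
--             dist = 0
--         elif dist is not None:
--             dist += 1
--         if (('while True:' in line or 'while 1:' in line)
--                 and (below is None or below >= 19)):
--             found = True
--     return found
-- ===== Notes on version B (the rewrite author's own statement) =====
-- stated objective: alternative
-- what changed: B makes a single backward pass with a running 'distance to the nearest break/return line below' accumulator and flags a 'while True:'/'while 1:' line when that distance exceeds the 19-line window, instead of A's forward scan that joins each loop's 19-line window into a string and substring-scans it.
import Mathlib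
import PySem

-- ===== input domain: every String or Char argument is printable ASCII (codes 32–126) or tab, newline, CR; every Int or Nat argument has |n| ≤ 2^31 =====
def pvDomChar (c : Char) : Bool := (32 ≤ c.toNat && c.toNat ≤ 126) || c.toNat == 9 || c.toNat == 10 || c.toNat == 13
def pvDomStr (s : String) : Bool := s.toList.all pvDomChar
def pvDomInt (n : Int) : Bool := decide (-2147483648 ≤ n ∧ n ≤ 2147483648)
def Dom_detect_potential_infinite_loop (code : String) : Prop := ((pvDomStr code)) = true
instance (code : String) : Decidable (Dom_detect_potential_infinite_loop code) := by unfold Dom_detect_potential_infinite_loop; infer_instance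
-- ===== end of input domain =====

-- B replaces A's forward scan with a per-while 19-line window join+substring-scan by a single
-- backward pass that maintains the distance to the nearest 'break'/'return' line below; same value.

-- ===== PORT A =====
def pvALoop (lines : List String) : Nat → List String → Bool
  | _, [] => false
  | i, line :: rest =>
    if PySem.Str.isIn "while True:" line || PySem.Str.isIn "while 1:" line then
      let loop_body := PySem.Str.join "\n"
        (PySem.List.slice lines (some ((i : Int) + 1)) (some ((i : Int) + 20)))
      if !PySem.Str.isIn "break" loop_body && !PySem.Str.isIn "return" loop_body then
        true
      else pvALoop lines (i + 1) rest
    else pvALoop lines (i + 1) rest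

def detect_potential_infinite_loop (code : String) : Bool :=
  let lines := (PySem.Str.split? code "\n").getD []
  pvALoop lines 0 lines

-- ===== PORT B =====
-- one step of Source B's backward loop; state = (found, dist)
def pvBStep (st : Bool × Option Int) (line : String) : Bool × Option Int :=
  let below := st.2
  let dist : Option Int :=
    if PySem.Str.isIn "break" line || PySem.Str.isIn "return" line then some 0
    else match st.2 with
      | some d => some (d + 1)
      | none => none
  let found : Bool :=
    if (PySem.Str.isIn "while True:" line || PySem.Str.isIn "while 1:" line)
        && (match below with | none => true | some b => decide ((19 : Int) ≤ b)) then true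
    else st.1
  (found, dist)

def detect_potential_infinite_loop_alt (code : String) : Bool :=
  let lines := (PySem.Str.split? code "\n").getD []
  (lines.reverse.foldl pvBStep (false, none)).1

-- ===== PRECONDITION & SPEC =====
def Spec_detect_potential_infinite_loop (code : String) (out : Bool) : Prop := out = detect_potential_infinite_loop_alt code
instance (code : String) (out : Bool) : Decidable (Spec_detect_potential_infinite_loop code out) := by unfold Spec_detect_potential_infinite_loop; infer_instance

-- ===== CLAIM (what is proved, stated in full; the proofs are below) =====
def Claim_equal_detect_potential_infinite_loop : Prop := ∀ (code : String), Dom_detect_potential_infinite_loop code → Spec_detect_potential_infinite_loop code (detect_potential_infinite_loop code)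

-- ===== LEMMAS AND PROOFS =====

def pvMarkerLine (line : String) : Bool :=
  PySem.Str.isIn "break" line || PySem.Str.isIn "return" line

def pvWhileLine (line : String) : Bool :=
  PySem.Str.isIn "while True:" line || PySem.Str.isIn "while 1:" line

-- A's loop restated as structural recursion on the remaining suffix
def pvAux : List String → Bool
  | [] => false
  | line :: rest =>
    if pvWhileLine line then
      if (rest.take 19).any pvMarkerLine then pvAux rest else true
    else pvAux rest

-- the foldr form of B's backward foldl
def pvG (line : String) (st : Bool × Option Int) : Bool × Option Int := pvBStep st line

-- a word not containing c, prefix of a ++ c :: b, is a prefix of a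
theorem pv_prefix_append_cons_iff {α : Type} (sub a b : List α) (c : α) (hc : c ∉ sub) :
    sub <+: a ++ c :: b ↔ sub <+: a := by
  constructor
  · intro h
    by_cases hlen : sub.length ≤ a.length
    · exact List.prefix_of_prefix_length_le h (a.prefix_append (c :: b)) hlen
    · exfalso
      have hi : a.length < sub.length := by omega
      have h2 := h.getElem hi
      simp at h2
      exact hc (h2 ▸ List.getElem_mem hi)
  · intro h
    exact h.trans (a.prefix_append (c :: b))

-- a nonempty word not containing c is infix of a ++ c :: b iff infix of a side
theorem pv_infix_append_cons_iff {α : Type} (sub : List α) (a b : List α) (c : α)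
    (hne : sub ≠ []) (hc : c ∉ sub) :
    sub <:+: a ++ c :: b ↔ sub <:+: a ∨ sub <:+: b := by
  induction a with
  | nil =>
    simp only [List.nil_append, List.infix_cons_iff, List.infix_nil]
    constructor
    · rintro (h | h)
      · exfalso
        apply hc
        match sub, hne with
        | x :: s, _ =>
          have := h.getElem (i := 0) (by simp)
          simp at this
          simp [this]
      · exact Or.inr h
    · rintro (h | h)
      · exact absurd h hne
      · exact Or.inr h
  | cons x a ih =>
    rw [List.cons_append, List.infix_cons_iff, List.infix_cons_iff, ih]
    rw [show x :: (a ++ c :: b) = (x :: a) ++ c :: b from rfl,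
        pv_prefix_append_cons_iff sub (x :: a) b c hc]
    tauto

-- substring of the '\n'-join = substring of some part (for words without '\n')
theorem pv_infix_join_iff (sub : List Char) (hne : sub ≠ []) (hc : '\n' ∉ sub)
    (ps : List (List Char)) :
    sub <:+: PySem.Chars.join ['\n'] ps ↔ ∃ p ∈ ps, sub <:+: p := by
  induction ps with
  | nil => simp [PySem.Chars.join_nil, List.infix_nil, hne]
  | cons p rest ih =>
    cases rest with
    | nil => simp [PySem.Chars.join_singleton]
    | cons q rest' =>
      rw [PySem.Chars.join_cons_cons]
      rw [show p ++ ['\n'] ++ PySem.Chars.join ['\n'] (q :: rest')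
            = p ++ '\n' :: PySem.Chars.join ['\n'] (q :: rest') by simp]
      rw [pv_infix_append_cons_iff sub p _ '\n' hne hc, ih]
      simp only [List.mem_cons]
      constructor
      · rintro (h | ⟨r, hr, h⟩)
        · exact ⟨p, Or.inl rfl, h⟩
        · exact ⟨r, Or.inr hr, h⟩
      · rintro ⟨r, (rfl | hr), h⟩
        · exact Or.inl h
        · exact Or.inr ⟨r, hr, h⟩

theorem pv_isIn_join (sub : String) (hne : sub.toList ≠ []) (hc : '\n' ∉ sub.toList)
    (ps : List String) :
    PySem.Str.isIn sub (PySem.Str.join "\n" ps) = ps.any (fun p => PySem.Str.isIn sub p) := by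
  rw [Bool.eq_iff_iff, PySem.Str.isIn_iff_infix, PySem.Str.toList_join, List.any_eq_true]
  have : ("\n" : String).toList = ['\n'] := rfl
  rw [this, pv_infix_join_iff sub.toList hne hc]
  constructor
  · rintro ⟨p, hp, h⟩
    obtain ⟨q, hq, rfl⟩ := List.mem_map.mp hp
    exact ⟨q, hq, (PySem.Str.isIn_iff_infix _ _).mpr h⟩
  · rintro ⟨q, hq, h⟩
    exact ⟨q.toList, List.mem_map.mpr ⟨q, hq, rfl⟩, (PySem.Str.isIn_iff_infix _ _).mp h⟩

-- marker test on the joined window = list-any of pvMarkerLine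
theorem pv_join_test (w : List String) :
    (!PySem.Str.isIn "break" (PySem.Str.join "\n" w)
      && !PySem.Str.isIn "return" (PySem.Str.join "\n" w))
    = !(w.any pvMarkerLine) := by
  rw [pv_isIn_join "break" (by decide) (by decide),
      pv_isIn_join "return" (by decide) (by decide)]
  unfold pvMarkerLine
  rw [Bool.eq_iff_iff]
  simp
  exact ⟨fun h x hx => ⟨h.1 x hx, h.2 x hx⟩,
    fun h => ⟨fun x hx => (h x hx).1, fun x hx => (h x hx).2⟩⟩

-- A's loop equals the suffix recursion pvAux
theorem pv_aloop_eq_aux (lines : List String) :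
    ∀ (i : Nat) (rest : List String), rest = lines.drop i →
      pvALoop lines i rest = pvAux rest := by
  intro i rest
  induction rest generalizing i with
  | nil => intro _; rfl
  | cons line rest ih =>
    intro hdrop
    have ht : lines.drop (i + 1) = rest := by
      have h0 : (lines.drop i).drop 1 = rest := by rw [← hdrop]; rfl
      rwa [List.drop_drop] at h0
    have hsl : PySem.List.slice lines (some ((i : Int) + 1)) (some ((i : Int) + 20))
        = rest.take 19 := by
      have h1 : ((i : Int) + 1) = ((i + 1 : Nat) : Int) := by push_cast; ring
      have h2 : ((i : Int) + 20) = ((i + 20 : Nat) : Int) := by push_cast; ring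
      rw [h1, h2, PySem.List.slice_natCast, ht]
      congr 1
      omega
    show pvALoop lines i (line :: rest) = pvAux (line :: rest)
    rw [pvALoop, pvAux, hsl]
    simp only [pv_join_test, ih (i + 1) ht.symm]
    cases hw : PySem.Str.isIn "while True:" line || PySem.Str.isIn "while 1:" line with
    | false =>
      unfold pvWhileLine
      rw [hw]
      simp
    | true =>
      unfold pvWhileLine
      rw [hw]
      cases (rest.take 19).any pvMarkerLine <;> simp

-- the dist component of B's fold: none if no marker, else nonnegative
theorem pv_md_nonneg (rest : List String) (d : Int)
    (h : (rest.foldr pvG (false, none)).2 = some d) : 0 ≤ d := by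
  induction rest generalizing d with
  | nil => simp [List.foldr] at h
  | cons line rest ih =>
    simp only [List.foldr, pvG, pvBStep] at h
    split at h
    · simp at h; omega
    · cases hmd : (List.foldr pvG (false, none) rest).2 with
      | none => rw [hmd] at h; simp at h
      | some d' =>
        rw [hmd] at h
        simp at h
        have := ih d' hmd
        omega

-- the "window clear" test of B equals all-no-marker on the first k suffix lines
theorem pv_md_ok (rest : List String) (k : Nat) :
    (match (rest.foldr pvG (false, none)).2 with
      | none => true | some b => decide ((k : Int) ≤ b))
    = (rest.take k).all (fun l => !pvMarkerLine l) := by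
  induction rest generalizing k with
  | nil => simp [List.foldr]
  | cons line rest ih =>
    by_cases hm : pvMarkerLine line = true
    · have hm0 : (PySem.Str.isIn "break" line || PySem.Str.isIn "return" line) = true := by
        simpa [pvMarkerLine] using hm
      have h2 : (List.foldr pvG (false, none) (line :: rest)).2 = some 0 := by
        simp only [List.foldr, pvG, pvBStep]
        rw [if_pos hm0]
      rw [h2]
      cases k with
      | zero => simp
      | succ k =>
        rw [List.take_succ_cons, List.all_cons, hm]
        simp
    · have hm' : pvMarkerLine line = false := by simpa using hm
      have hm0 : (PySem.Str.isIn "break" line || PySem.Str.isIn "return" line) = false := by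
        simpa [pvMarkerLine] using hm'
      have h2 : (List.foldr pvG (false, none) (line :: rest)).2
          = (List.foldr pvG (false, none) rest).2.map (· + 1) := by
        simp only [List.foldr, pvG, pvBStep]
        rw [hm0]
        simp only [Bool.false_eq_true, if_false]
        cases (List.foldr pvG (false, none) rest).2 <;> simp
      rw [h2]
      cases k with
      | zero =>
        cases hmd : (List.foldr pvG (false, none) rest).2 with
        | none => simp
        | some d =>
          have := pv_md_nonneg rest d hmd
          simp only [Option.map_some, List.take_zero, List.all_nil]
          rw [decide_eq_true_iff.mpr (by omega : ((0 : Nat) : Int) ≤ d + 1)]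
      | succ k =>
        rw [List.take_succ_cons, List.all_cons, hm', ← ih k]
        cases (List.foldr pvG (false, none) rest).2 with
        | none => simp
        | some d =>
          simp only [Option.map_some, Bool.not_false, Bool.true_and,
            decide_eq_decide]
          push_cast
          omega

-- main induction: pvAux = found component of B's fold
theorem pv_aux_eq_fold (rest : List String) :
    pvAux rest = (rest.foldr pvG (false, none)).1 := by
  induction rest with
  | nil => rfl
  | cons line rest ih =>
    have hfold : (List.foldr pvG (false, none) (line :: rest)).1
        = (if pvWhileLine line
              && (match (List.foldr pvG (false, none) rest).2 with
                  | none => true | some b => decide ((19 : Int) ≤ b)) then true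
           else (List.foldr pvG (false, none) rest).1) := by
      simp only [List.foldr, pvG, pvBStep, pvWhileLine]
      rfl
    have h19 := pv_md_ok rest 19
    norm_num at h19
    rw [hfold, h19, ← ih]
    rw [pvAux]
    by_cases hw : pvWhileLine line = true
    · simp only [hw, Bool.true_and]
      by_cases ha : (rest.take 19).any pvMarkerLine = true
      · have : (rest.take 19).all (fun l => !pvMarkerLine l) = false := by
          simp [List.all_eq_not_any_not]; simpa using ha
        simp [ha, this]
      · have ha' : (rest.take 19).any pvMarkerLine = false := by simpa using ha
        have : (rest.take 19).all (fun l => !pvMarkerLine l) = true := by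
          simp [List.all_eq_not_any_not]; simpa using ha'
        simp [ha', this]
    · have hw' : pvWhileLine line = false := by simpa using hw
      simp [hw']

-- ===== VERDICT (by name: the statement is the Claim_ definition above) =====
theorem detect_potential_infinite_loop_spec : Claim_equal_detect_potential_infinite_loop := by
  intro code _
  unfold Spec_detect_potential_infinite_loop detect_potential_infinite_loop
    detect_potential_infinite_loop_alt
  show pvALoop ((PySem.Str.split? code "\n").getD []) 0 ((PySem.Str.split? code "\n").getD [])
      = (List.foldl pvBStep (false, none) ((PySem.Str.split? code "\n").getD []).reverse).1
  rw [List.foldl_reverse, pv_aloop_eq_aux _ 0 _ (by simp), pv_aux_eq_fold]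
  rfl
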